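-- pv_equiv track=rewrite | github.com/MaestroMed/kckills | worker/scripts/backfill_phase1_metadata.py | era_for_date
-- ===== SOURCE A (Python) =====
-- ERA_RANGES: list[tuple[str, str, str]] = [
--     # (era_id,                  date_start,    date_end)
--     ("lfl-2021-spring",         "2021-01-01",  "2021-04-30"),
--     ("lfl-2021-summer",         "2021-05-01",  "2021-09-30"),
--     ("lfl-2021-showmatch",      "2021-10-01",  "2021-12-31"),
--     ("lfl-2022-spring",         "2022-01-01",  "2022-05-31"),
--     ("lfl-2022-summer",         "2022-06-01",  "2022-09-30"),
--     ("lfl-2022-showmatch",      "2022-10-01",  "2022-12-31"),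
--     ("lfl-2023-spring",         "2023-01-01",  "2023-05-31"),
--     ("lfl-2023-summer",         "2023-06-01",  "2023-12-31"),
--     ("lec-2024-winter",         "2024-01-01",  "2024-03-31"),
--     ("lec-2024-spring",         "2024-04-01",  "2024-06-30"),
--     ("lec-2024-summer",         "2024-07-01",  "2024-12-31"),
--     ("lec-2025-winter",         "2025-01-01",  "2025-03-15"),
--     ("international-2025-firststand", "2025-03-16", "2025-04-30"),
--     ("lec-2025-spring",         "2025-05-01",  "2025-06-30"),
--     ("lec-2025-summer",         "2025-07-01",  "2025-12-31"),
--     ("lec-2026-versus",         "2026-01-01",  "2026-02-28"),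
--     ("lec-2026-spring",         "2026-03-01",  "2026-12-31"),
-- ]
--
-- def era_for_date(iso_date: str) -> str | None:
--     if not iso_date:
--         return None
--     d = iso_date[:10]
--     for era_id, start, end in ERA_RANGES:
--         if start <= d <= end:
--             return era_id
--     return None
-- ===== SOURCE B (Python) =====
-- import bisect
--
-- # The era table is stored compactly as (era_id, date_end) pairs plus the first
-- # start date: the ranges in A's table are contiguous (each start is the day
-- # after the previous end), so the starts are reconstructed once at import time.
-- ERA_IDS_ENDS: list[tuple[str, str]] = [
--     ("lfl-2021-spring",               "2021-04-30"),
--     ("lfl-2021-summer",               "2021-09-30"),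
--     ("lfl-2021-showmatch",            "2021-12-31"),
--     ("lfl-2022-spring",               "2022-05-31"),
--     ("lfl-2022-summer",               "2022-09-30"),
--     ("lfl-2022-showmatch",            "2022-12-31"),
--     ("lfl-2023-spring",               "2023-05-31"),
--     ("lfl-2023-summer",               "2023-12-31"),
--     ("lec-2024-winter",               "2024-03-31"),
--     ("lec-2024-spring",               "2024-06-30"),
--     ("lec-2024-summer",               "2024-12-31"),
--     ("lec-2025-winter",               "2025-03-15"),
--     ("international-2025-firststand", "2025-04-30"),
--     ("lec-2025-spring",               "2025-06-30"),
--     ("lec-2025-summer",               "2025-12-31"),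
--     ("lec-2026-versus",               "2026-02-28"),
--     ("lec-2026-spring",               "2026-12-31"),
-- ]
--
-- FIRST_START = "2021-01-01"
--
-- def _next_day(date: str) -> str:
--     y, m, day = int(date[0:4]), int(date[5:7]), int(date[8:10])
--     leap = y % 4 == 0 and (y % 100 != 0 or y % 400 == 0)
--     month_len = [31, 29 if leap else 28, 31, 30, 31, 30, 31, 31, 30, 31, 30, 31][m - 1]
--     if day < month_len:
--         day += 1
--     elif m < 12:
--         m, day = m + 1, 1
--     else:
--         y, m, day = y + 1, 1, 1
--     return "%04d-%02d-%02d" % (y, m, day)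
--
-- _TABLE: list[tuple[str, str, str]] = []
-- _s = FIRST_START
-- for _eid, _end in ERA_IDS_ENDS:
--     _TABLE.append((_eid, _s, _end))
--     _s = _next_day(_end)
--
-- _STARTS = [start for _, start, _ in _TABLE]
--
-- def era_for_date(iso_date: str) -> str | None:
--     if not iso_date:
--         return None
--     d = iso_date[:10]
--     i = bisect.bisect_right(_STARTS, d) - 1
--     if i < 0:
--         return None
--     era_id, _, end = _TABLE[i]
--     return era_id if d <= end else None
-- ===== Notes on version B (the rewrite author's own statement) =====
-- stated objective: alternative
-- what changed: B stores the table compactly as (era_id, end) pairs, reconstructs each start as the day after the previous end with a calendar next-day routine at import time (the ranges are contiguous), and answers queries with a bisect_right binary search on the start list plus one end-date check instead of A's sequential scan.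
import Mathlib
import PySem

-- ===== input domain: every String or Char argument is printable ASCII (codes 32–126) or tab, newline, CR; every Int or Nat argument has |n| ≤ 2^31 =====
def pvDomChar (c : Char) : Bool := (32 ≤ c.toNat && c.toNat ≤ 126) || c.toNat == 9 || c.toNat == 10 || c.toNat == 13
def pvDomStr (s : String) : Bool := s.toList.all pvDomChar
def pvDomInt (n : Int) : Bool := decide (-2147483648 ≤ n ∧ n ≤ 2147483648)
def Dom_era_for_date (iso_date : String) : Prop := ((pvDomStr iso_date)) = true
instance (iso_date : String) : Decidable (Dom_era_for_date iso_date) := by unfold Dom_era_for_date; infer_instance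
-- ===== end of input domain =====

-- B stores the era table compactly as (era_id, end) pairs, reconstructs each start as the
-- day after the previous end (the ranges are contiguous) with a calendar next-day routine,
-- and answers queries with bisect_right on the start list plus one end-date check,
-- instead of A's sequential scan of the full (id, start, end) table.
-- String comparison/slicing is done on .toList (code-point order, identical to Python's str order).

-- ===== PORT A =====
def eraRanges : List (String × String × String) :=
  [("lfl-2021-spring",         "2021-01-01",  "2021-04-30"),
   ("lfl-2021-summer",         "2021-05-01",  "2021-09-30"),
   ("lfl-2021-showmatch",      "2021-10-01",  "2021-12-31"),
   ("lfl-2022-spring",         "2022-01-01",  "2022-05-31"),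
   ("lfl-2022-summer",         "2022-06-01",  "2022-09-30"),
   ("lfl-2022-showmatch",      "2022-10-01",  "2022-12-31"),
   ("lfl-2023-spring",         "2023-01-01",  "2023-05-31"),
   ("lfl-2023-summer",         "2023-06-01",  "2023-12-31"),
   ("lec-2024-winter",         "2024-01-01",  "2024-03-31"),
   ("lec-2024-spring",         "2024-04-01",  "2024-06-30"),
   ("lec-2024-summer",         "2024-07-01",  "2024-12-31"),
   ("lec-2025-winter",         "2025-01-01",  "2025-03-15"),
   ("international-2025-firststand", "2025-03-16", "2025-04-30"),
   ("lec-2025-spring",         "2025-05-01",  "2025-06-30"),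
   ("lec-2025-summer",         "2025-07-01",  "2025-12-31"),
   ("lec-2026-versus",         "2026-01-01",  "2026-02-28"),
   ("lec-2026-spring",         "2026-03-01",  "2026-12-31")]

-- A's 'for era_id, start, end in ERA_RANGES: if start <= d <= end: return era_id'
def eraScan (d : List Char) : List (String × String × String) → Option String
  | [] => none
  | (eid, s, e) :: rest =>
      if s.toList ≤ d ∧ d ≤ e.toList then some eid else eraScan d rest

def era_for_date (iso_date : String) : Option String :=
  if iso_date.toList = [] then none
  else eraScan (PySem.List.slice iso_date.toList none (some 10)) eraRanges

-- ===== PORT B =====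
-- ERA_IDS_ENDS: the (era_id, date_end) pairs
def eraIdsEnds : List (String × String) :=
  [("lfl-2021-spring",               "2021-04-30"),
   ("lfl-2021-summer",               "2021-09-30"),
   ("lfl-2021-showmatch",            "2021-12-31"),
   ("lfl-2022-spring",               "2022-05-31"),
   ("lfl-2022-summer",               "2022-09-30"),
   ("lfl-2022-showmatch",            "2022-12-31"),
   ("lfl-2023-spring",               "2023-05-31"),
   ("lfl-2023-summer",               "2023-12-31"),
   ("lec-2024-winter",               "2024-03-31"),
   ("lec-2024-spring",               "2024-06-30"),
   ("lec-2024-summer",               "2024-12-31"),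
   ("lec-2025-winter",               "2025-03-15"),
   ("international-2025-firststand", "2025-04-30"),
   ("lec-2025-spring",               "2025-06-30"),
   ("lec-2025-summer",               "2025-12-31"),
   ("lec-2026-versus",               "2026-02-28"),
   ("lec-2026-spring",               "2026-12-31")]

def firstStart : String := "2021-01-01"

-- _next_day: int(date[0:4]) etc. over the literal end dates (all well-formed, so int() never
-- raises; .getD 0 only discharges the Option), month-length table, then "%04d-%02d-%02d"
-- formatting; for the nonnegative y/m/day produced here "%0kd" equals str(n).zfill(k).
def nextDay (date : List Char) : List Char :=
  let y := (PySem.Int.ofChars? (PySem.List.slice date (some 0) (some 4))).getD 0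
  let m := (PySem.Int.ofChars? (PySem.List.slice date (some 5) (some 7))).getD 0
  let day := (PySem.Int.ofChars? (PySem.List.slice date (some 8) (some 10))).getD 0
  let leap := PySem.Int.mod y 4 = 0 ∧ (PySem.Int.mod y 100 ≠ 0 ∨ PySem.Int.mod y 400 = 0)
  let monthLen := (PySem.List.pyGet?
    ([31, (if leap then (29 : Int) else 28), 31, 30, 31, 30, 31, 31, 30, 31, 30, 31]) (m - 1)).getD 0
  let fmt := fun (y m d : Int) =>
    PySem.Chars.zfill (PySem.Int.toChars y) 4 ++ '-' ::
      (PySem.Chars.zfill (PySem.Int.toChars m) 2 ++ '-' :: PySem.Chars.zfill (PySem.Int.toChars d) 2)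
  if day < monthLen then fmt y m (day + 1)
  else if m < 12 then fmt y (m + 1) 1
  else fmt (y + 1) 1 1

-- the module-level loop building _TABLE from ERA_IDS_ENDS and the running start date
def buildTable (s : List Char) : List (String × String) → List (String × String × String)
  | [] => []
  | (eid, e) :: rest => (eid, String.ofList s, e) :: buildTable (nextDay e.toList) rest

def eraTable : List (String × String × String) := buildTable firstStart.toList eraIdsEnds

def eraStarts : List (List Char) := eraTable.map (fun t => t.2.1.toList)

def era_for_date_alt (iso_date : String) : Option String :=
  if iso_date.toList = [] then none
  else
    let d := PySem.List.slice iso_date.toList none (some 10)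
    let i : Int := (PySem.List.bisectRight eraStarts d : Int) - 1
    if i < 0 then none
    else
      match PySem.List.pyGet? eraTable i with
      | some (eid, _, e) => if d ≤ e.toList then some eid else none
      | none => none

-- ===== PRECONDITION & SPEC =====
def Spec_era_for_date (iso_date : String) (out : Option String) : Prop := out = era_for_date_alt iso_date
instance (iso_date : String) (out : Option String) : Decidable (Spec_era_for_date iso_date out) := by unfold Spec_era_for_date; infer_instance

-- ===== CLAIM (what is proved, stated in full; the proofs are below) =====
def Claim_equal_era_for_date : Prop := ∀ (iso_date : String), Dom_era_for_date iso_date → Spec_era_for_date iso_date (era_for_date iso_date)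

-- ===== LEMMAS AND PROOFS =====

-- B's reconstructed table (start = day after previous end) is exactly A's literal table.
lemma eraTable_eq : eraTable = eraRanges := by decide

-- A's scan over a table whose ranges are ordered and disjoint equals a countP-indexed lookup.
lemma eraScan_eq_countP (d : List Char) (rs : List (String × String × String))
    (hpw : rs.Pairwise (fun a b => a.2.2.toList < b.2.1.toList))
    (hse : ∀ r ∈ rs, r.2.1.toList ≤ r.2.2.toList) :
    eraScan d rs =
      (let j := rs.countP (fun r => decide (r.2.1.toList ≤ d))
       if j = 0 then none
       else
         match rs[j-1]? with
         | some (eid, _, e) => if d ≤ e.toList then some eid else none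
         | none => none) := by
  induction rs with
  | nil => simp [eraScan]
  | cons r t ih =>
    obtain ⟨hr, hpwt⟩ := List.pairwise_cons.mp hpw
    have hse_r : r.2.1.toList ≤ r.2.2.toList := hse r (by simp)
    have hse_t : ∀ x ∈ t, x.2.1.toList ≤ x.2.2.toList := fun x hx => hse x (by simp [hx])
    obtain ⟨eid, s, e⟩ := r
    by_cases hs : s.toList ≤ d
    · by_cases he : d ≤ e.toList
      · -- first range matches; no later start can be ≤ d
        have ht0 : t.countP (fun r => decide (r.2.1.toList ≤ d)) = 0 := by
          refine List.countP_eq_zero.mpr ?_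
          intro b hb hbd
          have h1 : b.2.1.toList ≤ d := of_decide_eq_true hbd
          exact absurd (lt_of_le_of_lt he (hr b hb)) (not_lt_of_ge h1)
        simp [eraScan, hs, he, ht0]
      · -- start matches but end does not: scan continues into t
        rw [eraScan, if_neg (by simp [he]), ih hpwt hse_t]
        simp only [List.countP_cons, hs, decide_true]
        by_cases hjt : t.countP (fun r => decide (r.2.1.toList ≤ d)) = 0
        · simp [hjt, he]
        · obtain ⟨k, hk⟩ := Nat.exists_eq_succ_of_ne_zero hjt
          simp [hk]
    · -- d is before this range, hence before every later range: everything is none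
      have hds : d < s.toList := lt_of_not_ge hs
      have ht0 : t.countP (fun r => decide (r.2.1.toList ≤ d)) = 0 := by
        refine List.countP_eq_zero.mpr ?_
        intro b hb hbd
        have h1 : b.2.1.toList ≤ d := of_decide_eq_true hbd
        have h2 : s.toList < b.2.1.toList := lt_of_le_of_lt hse_r (hr b hb)
        exact absurd (lt_trans (lt_of_le_of_lt h1 hds) h2) (lt_irrefl _)
      rw [eraScan, if_neg (by simp [hs]), ih hpwt hse_t]
      simp [hs, ht0]

-- bisect_right's loop on a ≤-sorted list: returns k in [lo,hi] splitting ≤ x from > x,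
-- given that everything below lo is ≤ x and everything at/above hi is > x.
lemma bisectRightLoop_props (xs : List (List Char)) (x : List Char)
    (hsort : ∀ i j, (hi : i < xs.length) → (hj : j < xs.length) → i ≤ j → xs[i] ≤ xs[j]) :
    ∀ fuel lo hi, lo ≤ hi → hi ≤ xs.length → hi - lo ≤ fuel →
    (∀ j, (hj : j < xs.length) → j < lo → xs[j] ≤ x) →
    (∀ j, (hj : j < xs.length) → hi ≤ j → x < xs[j]) →
    lo ≤ PySem.List.bisectRightLoop xs x fuel lo hi ∧
    PySem.List.bisectRightLoop xs x fuel lo hi ≤ hi ∧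
    (∀ j, (hj : j < xs.length) → j < PySem.List.bisectRightLoop xs x fuel lo hi → xs[j] ≤ x) ∧
    (∀ j, (hj : j < xs.length) → PySem.List.bisectRightLoop xs x fuel lo hi ≤ j → x < xs[j]) := by
  intro fuel
  induction fuel with
  | zero =>
    intro lo hi hlohi hhile hfuel hbelow habove
    have : lo = hi := by omega
    subst this
    exact ⟨le_refl _, le_refl _, hbelow, habove⟩
  | succ fuel ih =>
    intro lo hi hlohi hhile hfuel hbelow habove
    rw [PySem.List.bisectRightLoop]
    by_cases hlt : lo < hi
    · have hmidlt : (lo + hi) / 2 < xs.length := by omega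
      have hget : xs[(lo + hi) / 2]? = some xs[(lo + hi) / 2] := List.getElem?_eq_getElem hmidlt
      simp only [if_pos hlt, hget]
      by_cases hcmp : x < xs[(lo + hi) / 2]
      · rw [if_pos hcmp]
        have habove' : ∀ j, (hj : j < xs.length) → (lo + hi) / 2 ≤ j → x < xs[j] := by
          intro j hj hmj
          exact lt_of_lt_of_le hcmp (hsort _ _ hmidlt hj hmj)
        have := ih lo ((lo + hi) / 2) (by omega) (by omega) (by omega) hbelow habove'
        exact ⟨this.1, le_trans this.2.1 (by omega), this.2.2⟩
      · rw [if_neg hcmp]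
        have hle : xs[(lo + hi) / 2] ≤ x := le_of_not_gt hcmp
        have hbelow' : ∀ j, (hj : j < xs.length) → j < (lo + hi) / 2 + 1 → xs[j] ≤ x := by
          intro j hj hjm
          exact le_trans (hsort _ _ hj hmidlt (by omega)) hle
        have := ih ((lo + hi) / 2 + 1) hi (by omega) hhile (by omega) hbelow' habove
        exact ⟨le_trans (by omega) this.1, this.2.1, this.2.2⟩
    · rw [if_neg hlt]
      have : lo = hi := by omega
      subst this
      exact ⟨le_refl _, le_refl _, hbelow, habove⟩

-- On a ≤-sorted list, bisect_right x counts the elements ≤ x.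
lemma bisectRight_eq_countP (xs : List (List Char)) (x : List Char)
    (hpw : xs.Pairwise (· ≤ ·)) :
    PySem.List.bisectRight xs x = xs.countP (fun y => decide (y ≤ x)) := by
  have hsort : ∀ i j, (hi : i < xs.length) → (hj : j < xs.length) → i ≤ j → xs[i] ≤ xs[j] := by
    intro i j hi hj hij
    rcases Nat.lt_or_ge i j with h | h
    · exact (List.pairwise_iff_getElem.mp hpw) i j hi hj h
    · have : i = j := by omega
      subst this; rfl
  obtain ⟨hlo, hhi, hle, hgt⟩ :=
    bisectRightLoop_props xs x hsort xs.length 0 xs.length (Nat.zero_le _) (le_refl _)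
      (by omega) (by intro j hj h; omega) (by intro j hj h; omega)
  set k := PySem.List.bisectRightLoop xs x xs.length 0 xs.length with hk
  have : PySem.List.bisectRight xs x = k := rfl
  rw [this]
  have hsplit : xs = xs.take k ++ xs.drop k := (List.take_append_drop k xs).symm
  have htake : (xs.take k).countP (fun y => decide (y ≤ x)) = k := by
    have hlen : (xs.take k).length = k := List.length_take_of_le hhi
    have h1 : (xs.take k).countP (fun y => decide (y ≤ x)) = (xs.take k).length := by
      refine List.countP_eq_length.mpr ?_
      intro a ha
      obtain ⟨i, hi, hia⟩ := List.mem_iff_getElem.mp ha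
      have hik : i < k := by rw [hlen] at hi; exact hi
      have : (xs.take k)[i] = xs[i]'(by omega) := List.getElem_take
      rw [this] at hia
      subst hia
      exact decide_eq_true (hle i (by omega) hik)
    rw [h1, hlen]
  have hdrop : (xs.drop k).countP (fun y => decide (y ≤ x)) = 0 := by
    refine List.countP_eq_zero.mpr ?_
    intro a ha hdec
    obtain ⟨i, hi, hia⟩ := List.mem_iff_getElem.mp ha
    have hlend : (xs.drop k).length = xs.length - k := List.length_drop
    have : (xs.drop k)[i] = xs[k + i]'(by omega) := List.getElem_drop
    rw [this] at hia
    subst hia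
    exact absurd (of_decide_eq_true hdec) (not_le_of_gt (hgt (k + i) (by omega) (by omega)))
  conv_rhs => rw [hsplit]
  rw [List.countP_append, htake, hdrop]
  omega

-- ===== VERDICT (by name: the statement is the Claim_ definition above) =====
theorem era_for_date_spec : Claim_equal_era_for_date := by
  intro iso_date _
  unfold Spec_era_for_date era_for_date era_for_date_alt
  by_cases hempty : iso_date.toList = []
  · simp [hempty]
  · rw [if_neg hempty, if_neg hempty]
    have htab : eraTable = eraRanges := eraTable_eq
    have hpwS : eraStarts.Pairwise (· ≤ ·) := by decide
    have hpwR : eraRanges.Pairwise (fun a b => a.2.2.toList < b.2.1.toList) := by decide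
    have hseR : ∀ r ∈ eraRanges, r.2.1.toList ≤ r.2.2.toList := by decide
    generalize PySem.List.slice iso_date.toList none (some 10) = d
    have hb := bisectRight_eq_countP eraStarts d hpwS
    have hcnt : eraStarts.countP (fun y => decide (y ≤ d)) =
        eraRanges.countP (fun r => decide (r.2.1.toList ≤ d)) := by
      rw [eraStarts, htab, List.countP_map]; rfl
    rw [eraScan_eq_countP d eraRanges hpwR hseR]
    simp only [hb, hcnt, htab]
    by_cases hj0 : eraRanges.countP (fun r => decide (r.2.1.toList ≤ d)) = 0
    · simp [hj0]
    · have hjpos : 1 ≤ eraRanges.countP (fun r => decide (r.2.1.toList ≤ d)) :=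
        Nat.one_le_iff_ne_zero.mpr hj0
      rw [if_neg hj0]
      have hcast : (eraRanges.countP (fun r => decide (r.2.1.toList ≤ d)) : Int) - 1 =
          ((eraRanges.countP (fun r => decide (r.2.1.toList ≤ d)) - 1 : Nat) : Int) := by omega
      simp only [hcast]
      rw [if_neg (by omega), PySem.List.pyGet?_natCast]
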